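-- pv_equiv track=rewrite | github.com/imenemoussaoui/Advanced-Programming-project | code/maroua.py | is_html
-- ===== SOURCE A (Python) =====
-- def is_html(text):
--     if not text:
--         return False
--     text_lower = text.lower()
--     # détecte les balises HTML communes
--     html_tags = ['<html', '<body', '<div', '<table', '<p', '<a', '<span']
--     for tag in html_tags:
--         if tag in text_lower:
--             return True
--     return False
-- ===== SOURCE B (Python) =====
-- import re
--
-- _TAG_RE = re.compile(r'<(html|body|div|table|p|a|span)')
--
-- def is_html(text):
--     if not text:
--         return False
--     return _TAG_RE.search(text.lower()) is not None
-- ===== Notes on version B (the rewrite author's own statement) =====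
-- stated objective: idiomatic
-- what changed: Replaced the seven independent substring-membership scans by a single compiled-regex left-to-right pass that matches an opening angle bracket followed by any of the tag names.
import Mathlib
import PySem

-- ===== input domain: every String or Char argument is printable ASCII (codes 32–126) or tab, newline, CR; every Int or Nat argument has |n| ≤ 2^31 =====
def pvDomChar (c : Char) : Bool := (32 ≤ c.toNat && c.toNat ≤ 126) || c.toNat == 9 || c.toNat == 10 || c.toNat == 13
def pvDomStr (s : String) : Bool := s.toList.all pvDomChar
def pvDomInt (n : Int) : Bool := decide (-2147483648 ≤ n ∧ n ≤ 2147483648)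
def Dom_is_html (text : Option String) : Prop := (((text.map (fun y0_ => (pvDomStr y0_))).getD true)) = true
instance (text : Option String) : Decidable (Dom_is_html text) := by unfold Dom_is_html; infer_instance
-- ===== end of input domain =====

-- B replaces A's seven independent 'tag in text' substring scans by one left-to-right pass
-- (a compiled regex in Source B) that tries the tag alternation at each position; objective: idiomatic.

-- ===== PORT A =====
-- the for-loop over html_tags with its early return
def pvLoopA : List String → String → Bool
  | [], _ => false
  | t :: rest, low => if PySem.Str.isIn t low then true else pvLoopA rest low

def is_html (text : Option String) : Bool :=
  match text with
  | none => false
  | some s =>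
    if s.toList = [] then false     -- `if not text`: an empty str is falsy
    else
      pvLoopA ["<html", "<body", "<div", "<table", "<p", "<a", "<span"] (PySem.Str.lower s)

-- ===== PORT B =====
-- does the regex r'<(html|body|div|table|p|a|span)' match AT this position? (angle bracket, then one alternative)
def pvTagAlt (cs : List Char) : Bool :=
  match cs with
  | '<' :: rest =>
    PySem.Chars.startswith rest "html".toList || PySem.Chars.startswith rest "body".toList ||
    PySem.Chars.startswith rest "div".toList || PySem.Chars.startswith rest "table".toList ||
    PySem.Chars.startswith rest "p".toList || PySem.Chars.startswith rest "a".toList ||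
    PySem.Chars.startswith rest "span".toList
  | _ => false

-- re.search: one left-to-right scan, trying the alternation at each position
def pvScan : List Char → Bool
  | [] => false
  | c :: rest => pvTagAlt (c :: rest) || pvScan rest

def is_html_alt (text : Option String) : Bool :=
  match text with
  | none => false
  | some s =>
    if s.toList = [] then false     -- `if not text`
    else pvScan (PySem.Str.lower s).toList

-- ===== PRECONDITION & SPEC =====
def Spec_is_html (text : Option String) (out : Bool) : Prop := out = is_html_alt text
instance (text : Option String) (out : Bool) : Decidable (Spec_is_html text out) := by unfold Spec_is_html; infer_instance

-- ===== CLAIM (what is proved, stated in full; the proofs are below) =====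
def Claim_equal_is_html : Prop := ∀ (text : Option String), Dom_is_html text → Spec_is_html text (is_html text)

-- ===== LEMMAS AND PROOFS =====
lemma pvScan_iff (cs : List Char) :
    pvScan cs = true ↔ ∃ j, pvTagAlt (cs.drop j) = true := by
  induction cs with
  | nil => simp [pvScan, pvTagAlt]
  | cons c rest ih =>
    simp only [pvScan, Bool.or_eq_true, ih]
    constructor
    · rintro (h | ⟨j, hj⟩)
      · exact ⟨0, h⟩
      · exact ⟨j + 1, hj⟩
    · rintro ⟨j, hj⟩
      cases j with
      | zero => exact Or.inl hj
      | succ j => exact Or.inr ⟨j, hj⟩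

lemma pvTagAlt_iff (cs : List Char) :
    pvTagAlt cs = true ↔
      ("<html".toList <+: cs ∨ "<body".toList <+: cs ∨ "<div".toList <+: cs ∨
       "<table".toList <+: cs ∨ "<p".toList <+: cs ∨ "<a".toList <+: cs ∨
       "<span".toList <+: cs) := by
  have e1 : "<html".toList = '<' :: "html".toList := by decide
  have e2 : "<body".toList = '<' :: "body".toList := by decide
  have e3 : "<div".toList = '<' :: "div".toList := by decide
  have e4 : "<table".toList = '<' :: "table".toList := by decide
  have e5 : "<p".toList = '<' :: "p".toList := by decide
  have e6 : "<a".toList = '<' :: "a".toList := by decide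
  have e7 : "<span".toList = '<' :: "span".toList := by decide
  rw [e1, e2, e3, e4, e5, e6, e7]
  match cs with
  | [] => simp [pvTagAlt]
  | c :: rest =>
    by_cases hc : c = '<'
    · subst hc
      simp [pvTagAlt, PySem.Chars.startswith_iff, List.cons_prefix_cons, or_assoc]
    · have h1 : pvTagAlt (c :: rest) = false := by
        unfold pvTagAlt
        split
        · rename_i h; cases h; exact absurd rfl hc
        · rfl
      simp only [h1, Bool.false_eq_true, false_iff]
      push_neg
      simp only [List.cons_prefix_cons, not_and]
      exact ⟨fun h => absurd h.symm hc, fun h => absurd h.symm hc, fun h => absurd h.symm hc,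
        fun h => absurd h.symm hc, fun h => absurd h.symm hc, fun h => absurd h.symm hc,
        fun h => absurd h.symm hc⟩

lemma pvMain (s : String) :
    pvLoopA ["<html", "<body", "<div", "<table", "<p", "<a", "<span"] s = pvScan s.toList := by
  rw [Bool.eq_iff_iff]
  simp only [pvLoopA, Bool.if_true_left, Bool.or_eq_true, PySem.Str.isIn_eq,
    pvScan_iff, pvTagAlt_iff, exists_or, PySem.Chars.exists_prefix_drop_iff_isIn,
    PySem.Chars.isIn_iff_infix, decide_eq_true_eq, Bool.false_eq_true, or_false]

-- ===== VERDICT (by name: the statement is the Claim_ definition above) =====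
theorem is_html_spec : Claim_equal_is_html := by
  intro text _
  unfold Spec_is_html
  match text with
  | none => rfl
  | some s =>
    simp only [is_html, is_html_alt]
    split
    · rfl
    · exact pvMain (PySem.Str.lower s)
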